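-- pv_equiv track=rewrite | github.com/apokluda/Letter-Lizard | PyLetterLizard/game_generator.py | can_make_word
-- ===== SOURCE A (Python) =====
-- def can_make_word(letter_count, word):
--     """Determine if word can be formed from the letters in the letter_count map"""
--     letter_count = letter_count.copy()
--     for l in word:
--         try:
--             letter_count[l] -= 1
--             if letter_count[l] < 0:
--                 return False
--         except KeyError:
--             return False
--     return True
-- ===== SOURCE B (Python) =====
-- def can_make_word(letter_count, word):
--     """Determine if word can be formed from the letters in the letter_count map"""
--     need = {}
--     for c in word:
--         need[c] = need.get(c, 0) + 1
--     return all(letter_count.get(c, 0) >= n for c, n in need.items())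
-- ===== Notes on version B (the rewrite author's own statement) =====
-- stated objective: alternative
-- what changed: B builds a frequency table of the word in one counting pass and then compares each distinct letter's needed count against letter_count.get(c, 0), instead of A's destructive decrement-and-early-exit scan over a copied map.
import Mathlib
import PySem

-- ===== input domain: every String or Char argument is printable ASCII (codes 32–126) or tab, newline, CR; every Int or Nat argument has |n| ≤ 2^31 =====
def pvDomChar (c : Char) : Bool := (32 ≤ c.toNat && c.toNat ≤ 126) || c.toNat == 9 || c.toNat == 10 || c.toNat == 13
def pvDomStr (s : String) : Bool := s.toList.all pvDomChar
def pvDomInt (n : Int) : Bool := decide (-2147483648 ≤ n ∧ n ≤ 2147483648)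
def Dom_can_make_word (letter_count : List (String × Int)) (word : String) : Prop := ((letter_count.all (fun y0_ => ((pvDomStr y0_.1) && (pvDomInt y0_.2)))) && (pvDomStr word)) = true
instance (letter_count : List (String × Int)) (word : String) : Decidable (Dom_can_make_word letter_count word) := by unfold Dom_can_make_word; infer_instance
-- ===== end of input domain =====

-- B replaces A's destructive decrement-and-early-exit scan over a copied map by a
-- count-then-compare pass over the word's frequency table (alternative decomposition, same cost).


-- ===== PORT A =====
-- 'for l in word: letter_count[l] -= 1; if letter_count[l] < 0: return False  except KeyError: return False'
def canLoopA (d : PySem.Dict String Int) : List Char → Bool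
  | [] => true
  | c :: cs =>
    match d.get? (String.ofList [c]) with
    | none => false                               -- KeyError → return False
    | some v =>
      if v - 1 < 0 then false
      else canLoopA (d.insert (String.ofList [c]) (v - 1)) cs

def can_make_word (letter_count : List (String × Int)) (word : String) : Bool :=
  canLoopA (PySem.Dict.mk letter_count) word.toList

-- ===== PORT B =====
-- 'need = {}; for c in word: need[c] = need.get(c, 0) + 1; return all(letter_count.get(c, 0) >= n for c, n in need.items())'
def can_make_word_alt (letter_count : List (String × Int)) (word : String) : Bool :=
  ((word.toList.map (fun c => String.ofList [c])).foldl
      (fun m k => m.insert k (m.getD k 0 + 1)) PySem.Dict.empty).items.all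
    (fun p => decide ((PySem.Dict.mk letter_count).getD p.1 0 ≥ p.2))

-- ===== PRECONDITION & SPEC =====
def Spec_can_make_word (letter_count : List (String × Int)) (word : String) (out : Bool) : Prop := out = can_make_word_alt letter_count word
instance (letter_count : List (String × Int)) (word : String) (out : Bool) : Decidable (Spec_can_make_word letter_count word out) := by unfold Spec_can_make_word; infer_instance

-- ===== CLAIM (what is proved, stated in full; the proofs are below) =====
def Claim_equal_can_make_word : Prop := ∀ (letter_count : List (String × Int)) (word : String), Dom_can_make_word letter_count word → Spec_can_make_word letter_count word (can_make_word letter_count word)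

-- ===== LEMMAS AND PROOFS =====
theorem key_inj {a b : Char} (h : String.ofList [a] = String.ofList [b]) : a = b := by
  have := congrArg String.toList h
  simpa using this

-- A's loop returns true iff every letter of the remaining word occurs no more often than its
-- current balance in the dict.
theorem canLoopA_iff (cs : List Char) : ∀ (d : PySem.Dict String Int),
    canLoopA d cs = true ↔ ∀ c ∈ cs, ((cs.count c : Int) ≤ d.getD (String.ofList [c]) 0) := by
  induction cs with
  | nil => intro d; simp [canLoopA]
  | cons c cs ih =>
    intro d
    cases hg : d.get? (String.ofList [c]) with
    | none =>
      simp only [canLoopA, hg, Bool.false_eq_true, false_iff]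
      intro h
      have h0 := h c (by simp)
      rw [PySem.Dict.getD_eq_get?_getD, hg] at h0
      simp at h0
      omega
    | some v =>
      have hd : d.getD (String.ofList [c]) 0 = v := by
        rw [PySem.Dict.getD_eq_get?_getD, hg]; rfl
      by_cases hv : v - 1 < 0
      · simp only [canLoopA, hg, if_pos hv, Bool.false_eq_true, false_iff]
        intro h
        have h0 := h c (by simp)
        rw [hd] at h0
        have : (1 : Int) ≤ ((c :: cs).count c : Int) := by
          have : 0 < (c :: cs).count c := List.count_pos_iff.mpr (show c ∈ c :: cs by simp)
          omega
        omega
      · simp only [canLoopA, hg, if_neg hv]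
        rw [ih]
        constructor
        · intro h c' hc'
          by_cases hcc : c' = c
          · subst hcc
            rw [hd, List.count_cons_self]
            by_cases hm : c' ∈ cs
            · have := h c' hm
              rw [PySem.Dict.getD_insert, if_pos rfl] at this
              push_cast at this ⊢
              omega
            · rw [List.count_eq_zero_of_not_mem hm]
              omega
          · rcases List.mem_cons.mp hc' with h1 | h1
            · exact absurd h1 hcc
            · have := h c' h1
              rw [PySem.Dict.getD_insert, if_neg (fun he => hcc (key_inj he))] at this
              have hcc2 : ¬ c = c' := fun h => hcc h.symm
              simpa [List.count_cons, hcc2] using this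
        · intro h c' hc'
          by_cases hcc : c' = c
          · subst hcc
            have := h c' (by simp)
            rw [hd, List.count_cons_self] at this
            rw [PySem.Dict.getD_insert, if_pos rfl]
            push_cast at this ⊢
            omega
          · have := h c' (List.mem_cons_of_mem _ hc')
            rw [PySem.Dict.getD_insert, if_neg (fun he => hcc (key_inj he))]
            have hcc2 : ¬ c = c' := fun h => hcc h.symm
            simpa [List.count_cons, hcc2] using this

-- B's all-pass returns true iff the same condition holds, via the counter characterisation.
theorem alt_iff (letter_count : List (String × Int)) (word : String) :
    can_make_word_alt letter_count word = true ↔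
      ∀ c ∈ word.toList, ((word.toList.count c : Int) ≤ (PySem.Dict.mk letter_count).getD (String.ofList [c]) 0) := by
  unfold can_make_word_alt
  rw [PySem.Dict.foldl_insert_getD_add_one_eq_counter, PySem.Dict.items_counter]
  simp only [List.all_eq_true, List.mem_map, PySem.Set.mem_ofList]
  constructor
  · intro h c hc
    have := h (String.ofList [c], ((word.toList.map (fun c => String.ofList [c])).count (String.ofList [c]) : Int))
      ⟨String.ofList [c], ⟨c, hc, rfl⟩, rfl⟩
    simp only [decide_eq_true_eq] at this
    rwa [List.count_map_of_injective _ _ (fun a b => key_inj)] at this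
  · rintro h p ⟨k, ⟨c, hc, rfl⟩, rfl⟩
    simp only [decide_eq_true_eq]
    rw [List.count_map_of_injective _ _ (fun a b => key_inj)]
    exact h c hc

-- ===== VERDICT (by name: the statement is the Claim_ definition above) =====
theorem can_make_word_spec : Claim_equal_can_make_word := by
  intro letter_count word _
  unfold Spec_can_make_word can_make_word
  rw [Bool.eq_iff_iff, canLoopA_iff, alt_iff]
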